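-- pv_equiv track=rewrite | github.com/AzaubaevViktor/bf_evo_find | emulator/bytecode.py | _optimize_2
-- ===== SOURCE A (Python) =====
-- def _optimize_2(bc):
--     """ Change `----` to `('+', -4)`, etc. """
--     cmd = 'S'
--     count = 0
--
--     for opcode in bc:
--         if opcode[0] in "[]":
--             yield (cmd, count)
--             cmd, count = opcode
--         elif opcode[0] == cmd:
--             count += opcode[1]
--         elif opcode[0] != cmd:
--             yield (cmd, count)
--             cmd, count = opcode
--
--     yield (cmd, count)
-- ===== SOURCE B (Python) =====
-- def _optimize_2(bc):
--     """ Change `----` to `('+', -4)`, etc. """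
--     bc = list(bc)
--     yield ('S', 0)
--     i, n = 0, len(bc)
--     while i < n:
--         key = bc[i][0]
--         if key in "[]":
--             yield bc[i]
--             i += 1
--         else:
--             total = 0
--             while i < n and bc[i][0] == key:
--                 total += bc[i][1]
--                 i += 1
--             yield (key, total)
-- ===== Notes on version B (the rewrite author's own statement) =====
-- stated objective: simpler
-- what changed: Replaces A's carried (cmd,count) state machine with deferred yields by an emit-sentinel-first run scanner: it emits ('S',0) immediately, then for each position either re-emits a bracket opcode or consumes a whole run of equal non-bracket keys with an inner loop and emits its sum; no pending-state merge across the sentinel.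
-- intended difference: On inputs whose first opcode has key exactly 'S', A silently merges that leading run into its ('S',0) sentinel so the sentinel entry carries the run's total, while B keeps the sentinel separate and reports the leading run as its own entry; B's is intended because the sentinel is an implementation artefact and a leading run should be reported like any other run. — e.g. on _optimize_2([("S", 1)]): A returns [("S", 1)], B returns [("S", 0), ("S", 1)]
import Mathlib
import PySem

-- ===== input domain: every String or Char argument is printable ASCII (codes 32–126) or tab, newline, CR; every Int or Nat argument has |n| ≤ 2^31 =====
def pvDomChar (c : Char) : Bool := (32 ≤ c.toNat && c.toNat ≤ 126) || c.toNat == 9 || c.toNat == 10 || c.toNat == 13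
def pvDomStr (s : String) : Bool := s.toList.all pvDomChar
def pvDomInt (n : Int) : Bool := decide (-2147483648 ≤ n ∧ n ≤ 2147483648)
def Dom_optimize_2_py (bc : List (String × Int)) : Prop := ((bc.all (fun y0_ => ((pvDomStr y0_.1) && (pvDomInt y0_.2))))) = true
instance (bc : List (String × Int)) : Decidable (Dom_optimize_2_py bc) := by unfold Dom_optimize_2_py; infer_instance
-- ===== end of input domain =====

-- B replaces A's carried (cmd,count) state machine (deferred yields) with an emit-first
-- run scanner: sentinel first, then one (re-emitted bracket | summed run) per group; simpler.
-- Both functions are Python generators; equivalence is about the materialised output sequence.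

-- ===== PORT A =====
-- `opcode[0] in "[]"` is Python substring membership
def pvBracket (k : String) : Bool := PySem.Str.isIn k "[]"

-- the generator loop: state (cmd, count), yields collected in order
def pvALoop (cmd : String) (count : Int) : List (String × Int) → List (String × Int)
  | [] => [(cmd, count)]
  | op :: rest =>
    if pvBracket op.1 then (cmd, count) :: pvALoop op.1 op.2 rest
    else if op.1 == cmd then pvALoop cmd (count + op.2) rest
    else (cmd, count) :: pvALoop op.1 op.2 rest

def optimize_2_py (bc : List (String × Int)) : List (String × Int) :=
  pvALoop "S" 0 bc

-- ===== PORT B =====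
-- inner `while i < n and bc[i][0] == key: total += bc[i][1]` loop:
-- returns (sum of the leading run of `key`, remaining suffix)
def pvRun (key : String) : List (String × Int) → Int × List (String × Int)
  | [] => (0, [])
  | op :: rest =>
    if op.1 == key then
      let (s, r) := pvRun key rest
      (op.2 + s, r)
    else (0, op :: rest)

-- outer `while i < n` loop; the Nat argument is fuel (= initial length), a totality
-- guard only: it never runs out when started at the list's length
def pvBLoop : Nat → List (String × Int) → List (String × Int)
  | _, [] => []
  | 0, _ :: _ => []
  | fuel + 1, op :: rest =>
    if pvBracket op.1 then op :: pvBLoop fuel rest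
    else
      let (s, r) := pvRun op.1 rest
      (op.1, op.2 + s) :: pvBLoop fuel r

def optimize_2_py_alt (bc : List (String × Int)) : List (String × Int) :=
  ("S", 0) :: pvBLoop bc.length bc

-- ===== PRECONDITION & SPEC =====
-- On inputs whose first opcode key is exactly "S", A merges that leading run into its
-- ('S',0) sentinel while B keeps the sentinel separate; B's value is intended since the
-- sentinel is an implementation artefact and a leading run should be reported like any other.
def D_optimize_2_py (bc : List (String × Int)) : Prop :=
  bc.head?.map Prod.fst = some "S"
instance (bc : List (String × Int)) : Decidable (D_optimize_2_py bc) := by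
  unfold D_optimize_2_py; infer_instance

def Spec_optimize_2_py (bc : List (String × Int)) (out : List (String × Int)) : Prop :=
  ¬ D_optimize_2_py bc → out = optimize_2_py_alt bc
instance (bc : List (String × Int)) (out : List (String × Int)) : Decidable (Spec_optimize_2_py bc out) := by
  unfold Spec_optimize_2_py; infer_instance

def pvDiffWitness_optimize_2_py : (List (String × Int)) := [("S", 1)]
def pvDiffWitnessOut_optimize_2_py : (List (String × Int)) × (List (String × Int)) :=
  ([("S", 1)], [("S", 0), ("S", 1)])

-- ===== CLAIM =====
def Claim_unchanged_optimize_2_py : Prop := ∀ (bc : List (String × Int)), Dom_optimize_2_py bc → Spec_optimize_2_py bc (optimize_2_py bc)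
def Claim_changed_optimize_2_py : Prop := Dom_optimize_2_py (pvDiffWitness_optimize_2_py) ∧ D_optimize_2_py (pvDiffWitness_optimize_2_py) ∧ optimize_2_py (pvDiffWitness_optimize_2_py) = pvDiffWitnessOut_optimize_2_py.1 ∧ optimize_2_py_alt (pvDiffWitness_optimize_2_py) = pvDiffWitnessOut_optimize_2_py.2 ∧ pvDiffWitnessOut_optimize_2_py.1 ≠ pvDiffWitnessOut_optimize_2_py.2
def Claim_exact_optimize_2_py : Prop := ∀ (bc : List (String × Int)), Dom_optimize_2_py bc → D_optimize_2_py bc → optimize_2_py bc ≠ optimize_2_py_alt bc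

-- ===== LEMMAS AND PROOFS =====

theorem pvBracket_S : pvBracket "S" = false := by decide

theorem pvRun_len_le (key : String) (l : List (String × Int)) :
    (pvRun key l).2.length ≤ l.length := by
  induction l with
  | nil => simp [pvRun]
  | cons op rest ih =>
    simp only [pvRun]
    split
    · simpa using le_trans ih (Nat.le_succ _)
    · simp

-- fuel is irrelevant as long as it covers the list's length
theorem pvBLoop_fuel (n : Nat) : ∀ (l : List (String × Int)), l.length ≤ n →
    ∀ (f1 f2 : Nat), l.length ≤ f1 → l.length ≤ f2 → pvBLoop f1 l = pvBLoop f2 l := by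
  induction n with
  | zero =>
    intro l hl f1 f2 _ _
    interval_cases hl' : l.length
    cases l with
    | nil => cases f1 <;> cases f2 <;> rfl
    | cons a t => simp at hl'
  | succ n ih =>
    intro l hl f1 f2 h1 h2
    cases l with
    | nil => cases f1 <;> cases f2 <;> rfl
    | cons op rest =>
      obtain ⟨g1, rfl⟩ : ∃ g, f1 = g + 1 := by
        cases f1 with
        | zero => simp at h1
        | succ g => exact ⟨g, rfl⟩
      obtain ⟨g2, rfl⟩ : ∃ g, f2 = g + 1 := by
        cases f2 with
        | zero => simp at h2
        | succ g => exact ⟨g, rfl⟩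
      simp only [List.length_cons, Nat.add_le_add_iff_right] at hl h1 h2
      rw [pvBLoop, pvBLoop]
      by_cases hb : pvBracket op.1 = true
      · rw [if_pos hb, if_pos hb, ih rest hl g1 g2 h1 h2]
      · rw [if_neg hb, if_neg hb]
        have hr := pvRun_len_le op.1 rest
        rcases hpr : pvRun op.1 rest with ⟨s, r⟩
        rw [hpr] at hr
        show (op.1, op.2 + s) :: pvBLoop g1 r = (op.1, op.2 + s) :: pvBLoop g2 r
        simp only at hr
        rw [ih r (le_trans hr hl) g1 g2 (le_trans hr h1) (le_trans hr h2)]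

-- main invariant relating A's deferred-yield state machine to B's run scanner
theorem pvALoop_eq (bc : List (String × Int)) : ∀ (fuel : Nat) (cmd : String) (count : Int),
    bc.length ≤ fuel →
    pvALoop cmd count bc =
      if pvBracket cmd then (cmd, count) :: pvBLoop fuel bc
      else
        (cmd, count + (pvRun cmd bc).1) :: pvBLoop fuel (pvRun cmd bc).2 := by
  induction bc with
  | nil =>
    intro fuel cmd count _
    cases fuel <;> simp [pvALoop, pvRun, pvBLoop]
  | cons op rest ih =>
    intro fuel cmd count hf
    obtain ⟨f, rfl⟩ : ∃ f, fuel = f + 1 := by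
      cases fuel with
      | zero => simp at hf
      | succ f => exact ⟨f, rfl⟩
    simp only [List.length_cons, Nat.add_le_add_iff_right] at hf
    by_cases hb : pvBracket op.1 = true
    · -- op is a bracket: it cannot equal a non-bracket cmd, so pvRun stops here
      have hne : (op.1 == cmd) = true → pvBracket cmd = true := by
        intro h; exact (beq_iff_eq.mp h) ▸ hb
      rw [pvALoop, if_pos hb, ih f op.1 op.2 hf, if_pos hb]
      by_cases hc : pvBracket cmd = true
      · rw [if_pos hc, pvBLoop, if_pos hb]
      · rw [if_neg hc]
        have hop : (op.1 == cmd) = false := by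
          cases h : (op.1 == cmd) with
          | true => exact absurd (hne h) hc
          | false => rfl
        rw [pvRun, if_neg (by simp [hop])]
        simp only [add_zero]
        rw [pvBLoop, if_pos hb]
    · -- op is not a bracket
      by_cases he : (op.1 == cmd) = true
      · -- merge into the current run
        have hceq : op.1 = cmd := beq_iff_eq.mp he
        have hcb : pvBracket cmd = false := hceq ▸ (by simpa using hb)
        rw [pvALoop, if_neg (by simp [hb]), if_pos he,
          ih f cmd (count + op.2) hf, if_neg (by simp [hcb]), if_neg (by simp [hcb])]
        rw [pvRun, if_pos (by simp [he])]
        have hr := pvRun_len_le cmd rest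
        rw [pvBLoop_fuel rest.length (pvRun cmd rest).2 hr f (f + 1)
          (le_trans hr hf) (le_trans hr (le_trans hf (Nat.le_succ f)))]
        rw [add_assoc]
      · -- a different non-bracket key: flush and start a new run
        rw [pvALoop, if_neg (by simp [hb]), if_neg he, ih f op.1 op.2 hf,
          if_neg (by simp [hb])]
        by_cases hc : pvBracket cmd = true
        · rw [if_pos hc, pvBLoop, if_neg (by simp [hb])]
        · rw [if_neg hc, pvRun, if_neg (by simp [he])]
          simp only [add_zero]
          rw [pvBLoop, if_neg (by simp [hb])]

-- ===== VERDICT =====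
theorem optimize_2_py_spec : Claim_unchanged_optimize_2_py := by
  intro bc _ hD
  show optimize_2_py bc = optimize_2_py_alt bc
  rw [optimize_2_py, pvALoop_eq bc bc.length "S" 0 (le_refl _),
    if_neg (by simp [pvBracket_S])]
  have hrun : pvRun "S" bc = (0, bc) := by
    cases bc with
    | nil => rfl
    | cons op rest =>
      have : (op.1 == "S") = false := by
        cases h : (op.1 == "S") with
        | true =>
          exact absurd (by simp [D_optimize_2_py, beq_iff_eq.mp h]) hD
        | false => rfl
      rw [pvRun, if_neg (by simp [this])]
  rw [hrun]
  rfl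

theorem optimize_2_py_changed : Claim_changed_optimize_2_py := by
  unfold Claim_changed_optimize_2_py; decide

theorem optimize_2_py_tight : Claim_exact_optimize_2_py := by
  intro bc _ hD
  obtain ⟨k, v, rest, rfl⟩ : ∃ k v rest, bc = (k, v) :: rest := by
    cases bc with
    | nil => exact absurd hD (by simp [D_optimize_2_py])
    | cons op rest => exact ⟨op.1, op.2, rest, rfl⟩
  have hS : k = "S" := by simpa [D_optimize_2_py] using hD
  subst hS
  -- under D_, B's output is A's output with the sentinel prepended, hence longer
  have hB : optimize_2_py_alt (("S", v) :: rest) =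
      ("S", 0) :: optimize_2_py (("S", v) :: rest) := by
    rw [optimize_2_py_alt, optimize_2_py,
      pvALoop_eq _ (("S", v) :: rest).length "S" 0 (le_refl _),
      if_neg (by simp [pvBracket_S])]
    rw [List.length_cons, pvBLoop, if_neg (by simp [pvBracket_S])]
    rw [pvRun, if_pos (by simp)]
    have hr := pvRun_len_le "S" rest
    rw [pvBLoop_fuel rest.length (pvRun "S" rest).2 hr (rest.length + 1) rest.length
      (le_trans hr (Nat.le_succ _)) hr]
    simp
  intro hcontra
  have := congrArg List.length (hB ▸ hcontra)
  simp at this
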